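-- pv_equiv track=rewrite | github.com/PaudGS/PersonalProjects | Pygame/Arkanoid.py | rect_check
-- ===== SOURCE A (Python) =====
-- def rect_check(x_ball,y_ball,y_speed,rows,columns,hit,x,y):
--     pos_x = 0
--     pos_y = 100
--     for j in range(rows):
--         pos_x = 0
--         for i in range(columns):
--             pos_list = (columns*j)+i
--             if ((pos_x < x_ball  and (pos_x + x) > x_ball  and (pos_y + y + 2) > y_ball and (pos_y + y - 3) < y_ball) or ((pos_x < x_ball  and (pos_x + x) > x_ball  and (pos_y + 2) > y_ball and (pos_y - 3) < y_ball))) and not hit[pos_list]: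
--                 y_speed = -y_speed
--                 hit[pos_list] = True
--             pos_x+=x
--         pos_y+=y
--     return y_speed,hit
-- ===== SOURCE B (Python) =====
-- def rect_check(x_ball, y_ball, y_speed, rows, columns, hit, x, y):
--     # Only one column can satisfy  i*x < x_ball < i*x + x : it needs x > 0 and
--     # x_ball not a multiple of x, and then i = x_ball // x.  So instead of
--     # scanning the whole grid we walk the rows once with that single candidate.
--     if x > 0 and x_ball % x != 0:
--         i0 = x_ball // x
--         if 0 <= i0 < columns:
--             t = y_ball - 100
--             for j in range(rows):
--                 if (j * y - 3 < t < j * y + 2) or ((j + 1) * y - 3 < t < (j + 1) * y + 2):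
--                     p = columns * j + i0
--                     if not hit[p]:
--                         y_speed = -y_speed
--                         hit[p] = True
--     return y_speed, hit
-- ===== Notes on version B (the rewrite author's own statement) =====
-- stated objective: faster
-- what changed: A scans every brick of the rows x columns grid; B notes that the x-condition pos_x < x_ball < pos_x + x can hold for at most one column (i0 = x_ball // x, only when x > 0 and x_ball is not a multiple of x), so it makes a single pass over the rows testing just that candidate brick.
import Mathlib
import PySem

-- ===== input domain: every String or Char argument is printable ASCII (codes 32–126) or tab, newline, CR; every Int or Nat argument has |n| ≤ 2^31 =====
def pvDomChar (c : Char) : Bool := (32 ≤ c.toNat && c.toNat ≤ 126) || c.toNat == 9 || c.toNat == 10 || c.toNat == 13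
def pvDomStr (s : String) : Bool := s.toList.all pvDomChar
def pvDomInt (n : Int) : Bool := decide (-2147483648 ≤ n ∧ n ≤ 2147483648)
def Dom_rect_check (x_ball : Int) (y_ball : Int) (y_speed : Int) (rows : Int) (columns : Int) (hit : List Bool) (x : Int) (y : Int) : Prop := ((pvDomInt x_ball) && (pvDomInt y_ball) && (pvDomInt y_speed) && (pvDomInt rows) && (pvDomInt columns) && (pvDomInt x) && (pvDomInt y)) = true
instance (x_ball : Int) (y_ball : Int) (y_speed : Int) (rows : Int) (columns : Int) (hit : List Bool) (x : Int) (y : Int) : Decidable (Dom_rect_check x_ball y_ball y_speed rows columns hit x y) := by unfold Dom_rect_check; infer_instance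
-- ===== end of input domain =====

-- B replaces A's scan of all rows*columns bricks by one pass over the rows with the single
-- candidate column x_ball // x (objective: faster). Both Pythons mutate `hit` in place the
-- same way; the theorems below are about the returned pair.

-- ===== PORT A =====
-- inner-loop body of A (state: y_speed, hit, pos_x)
def innerStepA (x_ball : Int) (y_ball : Int) (x : Int) (y : Int) (columns : Int) (j : Int) (pos_y : Int) (st : Int × List Bool × Int) (i : Int) : Int × List Bool × Int :=
  let pos_list := columns * j + i
  if ((st.2.2 < x_ball ∧ st.2.2 + x > x_ball ∧ pos_y + y + 2 > y_ball ∧ pos_y + y - 3 < y_ball) ∨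
      (st.2.2 < x_ball ∧ st.2.2 + x > x_ball ∧ pos_y + 2 > y_ball ∧ pos_y - 3 < y_ball)) ∧
     ¬ (PySem.List.pyGetD st.2.1 pos_list false = true) then
    (-st.1, PySem.List.pySetD st.2.1 pos_list true, st.2.2 + x)
  else
    (st.1, st.2.1, st.2.2 + x)

-- outer-loop body of A (state: y_speed, hit, pos_y); pos_x restarts at 0 each row
def rowStepA (x_ball : Int) (y_ball : Int) (x : Int) (y : Int) (columns : Int) (st : Int × List Bool × Int) (j : Int) : Int × List Bool × Int :=
  let inner := (PySem.List.pyRange 0 columns 1).foldl (innerStepA x_ball y_ball x y columns j st.2.2) (st.1, st.2.1, 0)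
  (inner.1, inner.2.1, st.2.2 + y)

def rect_check (x_ball : Int) (y_ball : Int) (y_speed : Int) (rows : Int) (columns : Int) (hit : List Bool) (x : Int) (y : Int) : Int × List Bool :=
  let r := (PySem.List.pyRange 0 rows 1).foldl (rowStepA x_ball y_ball x y columns) (y_speed, hit, 100)
  (r.1, r.2.1)

-- ===== PORT B =====
-- row body of B: one candidate brick (row j, column i0) per row
def rowStepB (t : Int) (y : Int) (columns : Int) (i0 : Int) (st : Int × List Bool) (j : Int) : Int × List Bool :=
  if (j * y - 3 < t ∧ t < j * y + 2) ∨ ((j + 1) * y - 3 < t ∧ t < (j + 1) * y + 2) then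
    let p := columns * j + i0
    if ¬ (PySem.List.pyGetD st.2 p false = true) then (-st.1, PySem.List.pySetD st.2 p true) else st
  else st

def rect_check_alt (x_ball : Int) (y_ball : Int) (y_speed : Int) (rows : Int) (columns : Int) (hit : List Bool) (x : Int) (y : Int) : Int × List Bool :=
  if x > 0 ∧ ¬ (PySem.Int.mod x_ball x = 0) then
    let i0 := PySem.Int.floordiv x_ball x
    if 0 ≤ i0 ∧ i0 < columns then
      (PySem.List.pyRange 0 rows 1).foldl (rowStepB (y_ball - 100) y columns i0) (y_speed, hit)
    else (y_speed, hit)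
  else (y_speed, hit)

-- ===== PRECONDITION & SPEC =====
-- Pre_ excludes exactly the inputs on which Python A raises IndexError: some geometrically hit
-- brick (its column is necessarily x_ball // x; its row j makes j*y or (j+1)*y land in the
-- 4-integer window around y_ball - 100, or is any row when y = 0) has index columns*j + i
-- past the end of `hit` (A reads hit[...] only for geometrically hit bricks).
def Pre_rect_check (x_ball : Int) (y_ball : Int) (y_speed : Int) (rows : Int) (columns : Int) (hit : List Bool) (x : Int) (y : Int) : Prop :=
  (0 < x ∧ ¬ (PySem.Int.mod x_ball x = 0) ∧ 0 ≤ PySem.Int.floordiv x_ball x ∧ PySem.Int.floordiv x_ball x < columns) →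
    ((y = 0 → ((100 + 2 > y_ball ∧ 100 - 3 < y_ball ∧ 0 < rows) →
        columns * (rows - 1) + PySem.Int.floordiv x_ball x < (hit.length : Int))) ∧
     (¬ y = 0 → ∀ v ∈ ([y_ball - 101, y_ball - 100, y_ball - 99, y_ball - 98] : List Int),
        ∀ j ∈ ([PySem.Int.floordiv v y, PySem.Int.floordiv v y - 1] : List Int),
          (0 ≤ j ∧ j < rows ∧
           ((100 + j * y + y + 2 > y_ball ∧ 100 + j * y + y - 3 < y_ball) ∨
            (100 + j * y + 2 > y_ball ∧ 100 + j * y - 3 < y_ball)))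
          → columns * j + PySem.Int.floordiv x_ball x < (hit.length : Int)))
instance (x_ball : Int) (y_ball : Int) (y_speed : Int) (rows : Int) (columns : Int) (hit : List Bool) (x : Int) (y : Int) : Decidable (Pre_rect_check x_ball y_ball y_speed rows columns hit x y) := by unfold Pre_rect_check; infer_instance
def pvWitness_rect_check : Int × Int × Int × Int × Int × List Bool × Int × Int := (7, 101, 5, 1, 1, [false], 10, 10)

def Spec_rect_check (x_ball : Int) (y_ball : Int) (y_speed : Int) (rows : Int) (columns : Int) (hit : List Bool) (x : Int) (y : Int) (out : Int × List Bool) : Prop := out = rect_check_alt x_ball y_ball y_speed rows columns hit x y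
instance (x_ball : Int) (y_ball : Int) (y_speed : Int) (rows : Int) (columns : Int) (hit : List Bool) (x : Int) (y : Int) (out : Int × List Bool) : Decidable (Spec_rect_check x_ball y_ball y_speed rows columns hit x y out) := by unfold Spec_rect_check; infer_instance

-- ===== CLAIM (what is proved, stated in full; the proofs are below) =====
def Claim_equal_rect_check : Prop := ∀ (x_ball : Int) (y_ball : Int) (y_speed : Int) (rows : Int) (columns : Int) (hit : List Bool) (x : Int) (y : Int), Dom_rect_check x_ball y_ball y_speed rows columns hit x y → Pre_rect_check x_ball y_ball y_speed rows columns hit x y → Spec_rect_check x_ball y_ball y_speed rows columns hit x y (rect_check x_ball y_ball y_speed rows columns hit x y)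

-- ===== LEMMAS AND PROOFS =====

-- the brick-update both programs perform on a candidate brick
def bstep (st : Int × List Bool) (p : Int) : Int × List Bool :=
  if ¬ (PySem.List.pyGetD st.2 p false = true) then (-st.1, PySem.List.pySetD st.2 p true) else st

-- x-geometry fires at column i iff x > 0, x_ball not a multiple of x, and i = x_ball // x
theorem xchar (x_ball x i : Int) :
    (i * x < x_ball ∧ x_ball < i * x + x) ↔
      (0 < x ∧ ¬ (PySem.Int.mod x_ball x = 0) ∧ i = PySem.Int.floordiv x_ball x) := by
  by_cases hx : 0 < x
  · have h1 := PySem.Int.floordiv_mul_add_mod x_ball x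
    have h2 : 0 ≤ PySem.Int.mod x_ball x := PySem.Int.mod_nonneg x_ball hx
    have h3 : PySem.Int.mod x_ball x < x := PySem.Int.mod_lt x_ball hx
    constructor
    · rintro ⟨ha, hb⟩
      have heq : PySem.Int.floordiv x_ball x = i := by
        rw [PySem.Int.floordiv_eq_iff_of_pos hx]
        constructor
        · nlinarith
        · nlinarith
      refine ⟨hx, ?_, heq.symm⟩
      intro h0
      rw [heq, h0] at h1
      simp at h1
      omega
    · rintro ⟨-, hm, hi⟩
      have hm' : 0 < PySem.Int.mod x_ball x := lt_of_le_of_ne h2 (Ne.symm hm)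
      subst hi
      constructor <;> nlinarith
  · constructor
    · rintro ⟨ha, hb⟩
      exfalso; apply hx; linarith
    · rintro ⟨hx0, -, -⟩; exact absurd hx0 hx
-- A's row condition at pos_y = 100 + j*y is B's row condition at j
theorem rowchar (y_ball y j t : Int) (ht : t = y_ball - 100) :
    ((100 + j * y + y + 2 > y_ball ∧ 100 + j * y + y - 3 < y_ball) ∨
     (100 + j * y + 2 > y_ball ∧ 100 + j * y - 3 < y_ball)) ↔
    ((j * y - 3 < t ∧ t < j * y + 2) ∨ ((j + 1) * y - 3 < t ∧ t < (j + 1) * y + 2)) := by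
  subst ht
  rw [show (j + 1) * y = j * y + y from by ring]
  generalize j * y = a
  omega
-- inner loop of A, characterised: at most the single column i0 fires
theorem inner_aux (x_ball y_ball x y columns j pos_y : Int) (n : Nat) (ys : Int) (h : List Bool) :
    (PySem.List.pyRange 0 (n : Int) 1).foldl (innerStepA x_ball y_ball x y columns j pos_y) (ys, h, 0) =
      (if 0 < x ∧ ¬ (PySem.Int.mod x_ball x = 0) ∧ 0 ≤ PySem.Int.floordiv x_ball x ∧ PySem.Int.floordiv x_ball x < (n : Int) ∧
          ((pos_y + y + 2 > y_ball ∧ pos_y + y - 3 < y_ball) ∨ (pos_y + 2 > y_ball ∧ pos_y - 3 < y_ball)) then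
        ((bstep (ys, h) (columns * j + PySem.Int.floordiv x_ball x)).1,
         (bstep (ys, h) (columns * j + PySem.Int.floordiv x_ball x)).2, (n : Int) * x)
      else (ys, h, (n : Int) * x)) := by
  set q := PySem.Int.floordiv x_ball x with hq
  induction n with
  | zero =>
    rw [show ((0 : Nat) : Int) = 0 from rfl, PySem.List.pyRange_one_eq_nil le_rfl]
    rw [if_neg (by rintro ⟨-, -, h1, h2, -⟩; omega)]
    norm_num
  | succ n ih =>
    rw [show ((n + 1 : Nat) : Int) = (n : Int) + 1 from by push_cast; ring,
        PySem.List.pyRange_one_succ_right (by positivity), List.foldl_append, ih]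
    simp only [List.foldl_cons, List.foldl_nil]
    by_cases hC : 0 < x ∧ ¬ (PySem.Int.mod x_ball x = 0) ∧ 0 ≤ q ∧ q < (n : Int) ∧
        ((pos_y + y + 2 > y_ball ∧ pos_y + y - 3 < y_ball) ∨ (pos_y + 2 > y_ball ∧ pos_y - 3 < y_ball))
    · rw [if_pos hC]
      have hXn : ¬ ((n : Int) * x < x_ball ∧ x_ball < (n : Int) * x + x) := by
        intro hX
        have := ((xchar x_ball x n).mp hX).2.2
        omega
      rw [show innerStepA x_ball y_ball x y columns j pos_y
            ((bstep (ys, h) (columns * j + q)).1, (bstep (ys, h) (columns * j + q)).2, (n : Int) * x) (n : Int)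
          = ((bstep (ys, h) (columns * j + q)).1, (bstep (ys, h) (columns * j + q)).2, (n : Int) * x + x) from by
        unfold innerStepA
        rw [if_neg (by rintro ⟨(⟨h1, h2, -, -⟩ | ⟨h1, h2, -, -⟩), -⟩ <;> exact hXn ⟨h1, by linarith⟩)]]
      rw [if_pos ⟨hC.1, hC.2.1, hC.2.2.1, by omega, hC.2.2.2.2⟩]
      simp only [Prod.mk.injEq, true_and]
      ring
    · rw [if_neg hC]
      have hstep : innerStepA x_ball y_ball x y columns j pos_y (ys, h, (n : Int) * x) (n : Int)
          = if (((n : Int) * x < x_ball ∧ (n : Int) * x + x > x_ball ∧ pos_y + y + 2 > y_ball ∧ pos_y + y - 3 < y_ball) ∨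
                ((n : Int) * x < x_ball ∧ (n : Int) * x + x > x_ball ∧ pos_y + 2 > y_ball ∧ pos_y - 3 < y_ball)) ∧
               ¬ (PySem.List.pyGetD h (columns * j + (n : Int)) false = true) then
              (-ys, PySem.List.pySetD h (columns * j + (n : Int)) true, (n : Int) * x + x)
            else (ys, h, (n : Int) * x + x) := rfl
      rw [hstep]
      by_cases hF : (((n : Int) * x < x_ball ∧ (n : Int) * x + x > x_ball ∧ pos_y + y + 2 > y_ball ∧ pos_y + y - 3 < y_ball) ∨
            ((n : Int) * x < x_ball ∧ (n : Int) * x + x > x_ball ∧ pos_y + 2 > y_ball ∧ pos_y - 3 < y_ball)) ∧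
          ¬ (PySem.List.pyGetD h (columns * j + (n : Int)) false = true)
      · rw [if_pos hF]
        obtain ⟨h1, h2, hY⟩ : ((n : Int) * x < x_ball ∧ x_ball < (n : Int) * x + x ∧
            ((pos_y + y + 2 > y_ball ∧ pos_y + y - 3 < y_ball) ∨ (pos_y + 2 > y_ball ∧ pos_y - 3 < y_ball))) := by
          rcases hF.1 with ⟨h1, h2, hy1, hy2⟩ | ⟨h1, h2, hy1, hy2⟩
          · exact ⟨h1, h2, Or.inl ⟨hy1, hy2⟩⟩
          · exact ⟨h1, h2, Or.inr ⟨hy1, hy2⟩⟩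
        have hXc := (xchar x_ball x n).mp ⟨h1, h2⟩
        have hqn : q = (n : Int) := by rw [hq, ← hXc.2.2]
        rw [if_pos ⟨hXc.1, hXc.2.1, by omega, by omega, hY⟩, hqn]
        unfold bstep
        rw [if_pos hF.2]
        simp only [Prod.mk.injEq, true_and]
        ring
      · rw [if_neg hF]
        by_cases hC1 : 0 < x ∧ ¬ (PySem.Int.mod x_ball x = 0) ∧ 0 ≤ q ∧ q < (n : Int) + 1 ∧
            ((pos_y + y + 2 > y_ball ∧ pos_y + y - 3 < y_ball) ∨ (pos_y + 2 > y_ball ∧ pos_y - 3 < y_ball))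
        · rw [if_pos hC1]
          have hqn : q = (n : Int) := by
            by_contra hne
            exact hC ⟨hC1.1, hC1.2.1, hC1.2.2.1, by omega, hC1.2.2.2.2⟩
          have hX : (n : Int) * x < x_ball ∧ x_ball < (n : Int) * x + x :=
            (xchar x_ball x n).mpr ⟨hC1.1, hC1.2.1, by omega⟩
          have hg : PySem.List.pyGetD h (columns * j + (n : Int)) false = true := by
            by_contra hg
            apply hF
            refine ⟨?_, hg⟩
            rcases hC1.2.2.2.2 with hY | hY
            · exact Or.inl ⟨hX.1, hX.2, hY.1, hY.2⟩
            · exact Or.inr ⟨hX.1, hX.2, hY.1, hY.2⟩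
          unfold bstep
          rw [hqn, if_neg (by simpa using hg)]
          simp only [Prod.mk.injEq, true_and]
          ring
        · rw [if_neg hC1]
          simp only [Prod.mk.injEq, true_and]
          ring
-- outer loop, trigger case: A's fold tracks B's fold with pos_y = 100 + n*y
theorem outer_aux (x_ball y_ball x y columns : Int)
    (hx : 0 < x) (hm : ¬ (PySem.Int.mod x_ball x = 0))
    (hc : 0 ≤ PySem.Int.floordiv x_ball x ∧ PySem.Int.floordiv x_ball x < columns)
    (n : Nat) (ys : Int) (h : List Bool) :
    (PySem.List.pyRange 0 (n : Int) 1).foldl (rowStepA x_ball y_ball x y columns) (ys, h, 100) =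
      (((PySem.List.pyRange 0 (n : Int) 1).foldl (rowStepB (y_ball - 100) y columns (PySem.Int.floordiv x_ball x)) (ys, h)).1,
       ((PySem.List.pyRange 0 (n : Int) 1).foldl (rowStepB (y_ball - 100) y columns (PySem.Int.floordiv x_ball x)) (ys, h)).2,
       100 + (n : Int) * y) := by
  set q := PySem.Int.floordiv x_ball x with hq
  induction n with
  | zero =>
    rw [show ((0 : Nat) : Int) = 0 from rfl, PySem.List.pyRange_one_eq_nil le_rfl]
    norm_num
  | succ n ih =>
    rw [show ((n + 1 : Nat) : Int) = (n : Int) + 1 from by push_cast; ring,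
        PySem.List.pyRange_one_succ_right (by positivity), List.foldl_append, List.foldl_append, ih]
    simp only [List.foldl_cons, List.foldl_nil]
    set B := (PySem.List.pyRange 0 (n : Int) 1).foldl (rowStepB (y_ball - 100) y columns q) (ys, h) with hB
    unfold rowStepA
    have hcols : PySem.List.pyRange 0 columns 1 = PySem.List.pyRange 0 ((columns.toNat : Nat) : Int) 1 := by
      rw [Int.toNat_of_nonneg (by omega)]
    rw [show ((B.1, B.2, 100 + (n : Int) * y) : Int × List Bool × Int).2.2 = 100 + (n : Int) * y from rfl]
    rw [hcols, inner_aux]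
    have hcast : ((columns.toNat : Nat) : Int) = columns := Int.toNat_of_nonneg (by omega)
    rw [hcast]
    have hrow := rowchar y_ball y (n : Int) (y_ball - 100) rfl
    by_cases hY : ((100 + (n : Int) * y) + y + 2 > y_ball ∧ (100 + (n : Int) * y) + y - 3 < y_ball) ∨
        ((100 + (n : Int) * y) + 2 > y_ball ∧ (100 + (n : Int) * y) - 3 < y_ball)
    · rw [if_pos ⟨hx, hm, hc.1, hc.2, hY⟩]
      have hBrow : ((n : Int) * y - 3 < y_ball - 100 ∧ y_ball - 100 < (n : Int) * y + 2) ∨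
          (((n : Int) + 1) * y - 3 < y_ball - 100 ∧ y_ball - 100 < ((n : Int) + 1) * y + 2) := hrow.mp hY
      rw [show rowStepB (y_ball - 100) y columns q B (n : Int)
          = if ¬ (PySem.List.pyGetD B.2 (columns * (n : Int) + q) false = true) then
              (-B.1, PySem.List.pySetD B.2 (columns * (n : Int) + q) true) else B from by
        unfold rowStepB; rw [if_pos hBrow]]
      unfold bstep
      by_cases hg : PySem.List.pyGetD B.2 (columns * (n : Int) + q) false = true
      · rw [if_neg (by simpa using hg)]
        simp only [Prod.mk.injEq, true_and]
        ring
      · rw [if_pos hg]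
        simp only [Prod.mk.injEq, true_and]
        ring
    · rw [if_neg (by rintro ⟨-, -, -, -, hY'⟩; exact hY hY')]
      rw [show rowStepB (y_ball - 100) y columns q B (n : Int) = B from by
        unfold rowStepB; rw [if_neg (fun hB' => hY (hrow.mpr hB'))]]
      simp only [Prod.mk.injEq, true_and]
      ring

-- outer loop, no-trigger case: A's fold changes nothing but pos_y
theorem outer_aux_id (x_ball y_ball x y columns : Int)
    (hng : ¬ (0 < x ∧ ¬ (PySem.Int.mod x_ball x = 0) ∧ 0 ≤ PySem.Int.floordiv x_ball x ∧ PySem.Int.floordiv x_ball x < columns))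
    (n : Nat) (ys : Int) (h : List Bool) :
    (PySem.List.pyRange 0 (n : Int) 1).foldl (rowStepA x_ball y_ball x y columns) (ys, h, 100) =
      (ys, h, 100 + (n : Int) * y) := by
  induction n with
  | zero =>
    rw [show ((0 : Nat) : Int) = 0 from rfl, PySem.List.pyRange_one_eq_nil le_rfl]
    norm_num
  | succ n ih =>
    rw [show ((n + 1 : Nat) : Int) = (n : Int) + 1 from by push_cast; ring,
        PySem.List.pyRange_one_succ_right (by positivity), List.foldl_append, ih]
    simp only [List.foldl_cons, List.foldl_nil]
    unfold rowStepA
    rw [show ((ys, h, 100 + (n : Int) * y) : Int × List Bool × Int).2.2 = 100 + (n : Int) * y from rfl]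
    by_cases hcpos : 0 < columns
    · have hcols : PySem.List.pyRange 0 columns 1 = PySem.List.pyRange 0 ((columns.toNat : Nat) : Int) 1 := by
        rw [Int.toNat_of_nonneg (by omega)]
      rw [hcols, inner_aux]
      have hcast : ((columns.toNat : Nat) : Int) = columns := Int.toNat_of_nonneg (by omega)
      rw [hcast]
      rw [if_neg (by rintro ⟨h1, h2, h3, h4, -⟩; exact hng ⟨h1, h2, h3, h4⟩)]
      simp only [Prod.mk.injEq, true_and]
      ring
    · rw [PySem.List.pyRange_one_eq_nil (by omega)]
      simp only [List.foldl_nil, Prod.mk.injEq, true_and]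
      ring

-- ===== VERDICT (by name: the statement is the Claim_ definition above) =====
theorem rect_check_spec : Claim_equal_rect_check := by
  intro x_ball y_ball y_speed rows columns hit x y hDom hPre
  unfold Spec_rect_check rect_check rect_check_alt
  by_cases hrows : 0 < rows
  · have hrn : rows = ((rows.toNat : Nat) : Int) := (Int.toNat_of_nonneg (by omega)).symm
    rw [hrn]
    by_cases htr : x > 0 ∧ ¬ (PySem.Int.mod x_ball x = 0)
    · by_cases hc : 0 ≤ PySem.Int.floordiv x_ball x ∧ PySem.Int.floordiv x_ball x < columns
      · rw [if_pos htr, if_pos hc,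
            outer_aux x_ball y_ball x y columns htr.1 htr.2 hc rows.toNat y_speed hit]
      · rw [if_pos htr, if_neg hc,
            outer_aux_id x_ball y_ball x y columns
              (by rintro ⟨h1, h2, h3, h4⟩; exact hc ⟨h3, h4⟩) rows.toNat y_speed hit]
    · rw [if_neg htr,
          outer_aux_id x_ball y_ball x y columns
            (by rintro ⟨h1, h2, -, -⟩; exact htr ⟨h1, h2⟩) rows.toNat y_speed hit]
  · rw [PySem.List.pyRange_one_eq_nil (by omega : rows ≤ 0)]
    simp only [List.foldl_nil]
    split_ifs <;> rfl
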